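-- pv_equiv track=rewrite | github.com/joey-torii/CPSC322-Final-Project | mysklearn/myutils.py | convert_mpg_rating
-- ===== SOURCE A (Python) =====
-- def convert_mpg_rating(mpg_list):
--     mpg_ratings = []
--     for value in mpg_list:
--         if value >= 45:
--             mpg_ratings.append(10)
--         elif value >= 37:
--             mpg_ratings.append(9)
--         elif value >= 31:
--             mpg_ratings.append(8)
--         elif value >= 26:
--             mpg_ratings.append(7)
--         elif value >= 24:
--             mpg_ratings.append(6)
--         elif value >= 20:
--             mpg_ratings.append(5)
--         elif value >= 17:
--             mpg_ratings.append(4)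
--         elif value >= 15:
--             mpg_ratings.append(3)
--         elif value >= 14:
--             mpg_ratings.append(2)
--         else:
--             mpg_ratings.append(1)
--
--     return mpg_ratings
-- ===== SOURCE B (Python) =====
-- _THRESHOLDS = [14, 15, 17, 20, 24, 26, 31, 37, 45]
--
--
-- def _bisect_right(a, x):
--     lo, hi = 0, len(a)
--     while lo < hi:
--         mid = (lo + hi) // 2
--         if x < a[mid]:
--             hi = mid
--         else:
--             lo = mid + 1
--     return lo
--
--
-- def convert_mpg_rating(mpg_list):
--     return [_bisect_right(_THRESHOLDS, value) + 1 for value in mpg_list]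
-- ===== Notes on version B (the rewrite author's own statement) =====
-- stated objective: alternative
-- what changed: Replaces the nine-branch if-elif cascade with a precomputed ascending threshold table and a hand-written binary search (bisect_right) per element, mapping each value to its bucket index + 1.
import Mathlib
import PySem

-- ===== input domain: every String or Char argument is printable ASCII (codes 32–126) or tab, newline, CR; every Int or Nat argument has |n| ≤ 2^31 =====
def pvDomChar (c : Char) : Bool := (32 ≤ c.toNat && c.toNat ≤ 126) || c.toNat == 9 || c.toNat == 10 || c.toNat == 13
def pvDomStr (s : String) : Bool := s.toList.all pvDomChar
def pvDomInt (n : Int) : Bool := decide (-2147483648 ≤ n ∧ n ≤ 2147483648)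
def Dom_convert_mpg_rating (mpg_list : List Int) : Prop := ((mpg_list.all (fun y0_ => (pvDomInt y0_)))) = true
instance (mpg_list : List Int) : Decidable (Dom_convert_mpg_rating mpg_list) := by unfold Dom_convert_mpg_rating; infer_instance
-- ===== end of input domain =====

-- B replaces A's nine-branch if-elif cascade with a fixed ascending threshold table and a
-- per-element binary search (bisect_right); same return value, similar cost (objective: alternative).

-- ===== PORT A =====
def convert_mpg_rating (mpg_list : List Int) : List Int :=
  mpg_list.foldl (fun mpg_ratings value =>
    if value ≥ 45 then mpg_ratings ++ [10]
    else if value ≥ 37 then mpg_ratings ++ [9]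
    else if value ≥ 31 then mpg_ratings ++ [8]
    else if value ≥ 26 then mpg_ratings ++ [7]
    else if value ≥ 24 then mpg_ratings ++ [6]
    else if value ≥ 20 then mpg_ratings ++ [5]
    else if value ≥ 17 then mpg_ratings ++ [4]
    else if value ≥ 15 then mpg_ratings ++ [3]
    else if value ≥ 14 then mpg_ratings ++ [2]
    else mpg_ratings ++ [1]) []

-- ===== PORT B =====
def pvThresholds : List Int := [14, 15, 17, 20, 24, 26, 31, 37, 45]

-- hand-written binary search from Source B (_bisect_right's while loop), transcribed step for step;
-- a.getD mid 0 is exact here because every index probed satisfies lo ≤ mid < hi ≤ a.length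
def pvBisectRight (a : List Int) (x : Int) (lo hi : Nat) : Nat :=
  if _h : lo < hi then
    let mid := (lo + hi) / 2
    if x < a.getD mid 0 then pvBisectRight a x lo mid
    else pvBisectRight a x (mid + 1) hi
  else lo
termination_by hi - lo
decreasing_by all_goals omega

def convert_mpg_rating_alt (mpg_list : List Int) : List Int :=
  mpg_list.map (fun value => (pvBisectRight pvThresholds value 0 pvThresholds.length : Int) + 1)

-- ===== PRECONDITION & SPEC =====
def Spec_convert_mpg_rating (mpg_list : List Int) (out : List Int) : Prop := out = convert_mpg_rating_alt mpg_list
instance (mpg_list : List Int) (out : List Int) : Decidable (Spec_convert_mpg_rating mpg_list out) := by unfold Spec_convert_mpg_rating; infer_instance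

-- ===== CLAIM (what is proved, stated in full; the proofs are below) =====
def Claim_equal_convert_mpg_rating : Prop := ∀ (mpg_list : List Int), Dom_convert_mpg_rating mpg_list → Spec_convert_mpg_rating mpg_list (convert_mpg_rating mpg_list)

-- ===== LEMMAS AND PROOFS =====

-- A's cascade, as a function of one value
def pvRateA (value : Int) : Int :=
  if value ≥ 45 then 10
  else if value ≥ 37 then 9
  else if value ≥ 31 then 8
  else if value ≥ 26 then 7
  else if value ≥ 24 then 6
  else if value ≥ 20 then 5
  else if value ≥ 17 then 4
  else if value ≥ 15 then 3
  else if value ≥ 14 then 2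
  else 1

theorem pvCell_eq (v : Int) :
    pvRateA v = (pvBisectRight pvThresholds v 0 pvThresholds.length : Int) + 1 := by
  show pvRateA v = (pvBisectRight pvThresholds v 0 9 : Int) + 1
  repeat (rw [pvBisectRight]; norm_num [pvThresholds])
  simp only [pvRateA]
  split_ifs <;> push_cast <;> omega

theorem convert_mpg_rating_eq_map (l : List Int) :
    convert_mpg_rating l = l.map pvRateA := by
  have hbody : (fun (mpg_ratings : List Int) (value : Int) =>
      if value ≥ 45 then mpg_ratings ++ [(10:Int)]
      else if value ≥ 37 then mpg_ratings ++ [9]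
      else if value ≥ 31 then mpg_ratings ++ [8]
      else if value ≥ 26 then mpg_ratings ++ [7]
      else if value ≥ 24 then mpg_ratings ++ [6]
      else if value ≥ 20 then mpg_ratings ++ [5]
      else if value ≥ 17 then mpg_ratings ++ [4]
      else if value ≥ 15 then mpg_ratings ++ [3]
      else if value ≥ 14 then mpg_ratings ++ [2]
      else mpg_ratings ++ [1]) =
      (fun mpg_ratings value => mpg_ratings ++ [pvRateA value]) := by
    funext acc v
    simp only [pvRateA]
    split_ifs <;> rfl
  show List.foldl _ [] l = _
  rw [hbody, PySem.List.foldl_append_singleton_eq_map]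
  simp

-- ===== VERDICT (by name: the statement is the Claim_ definition above) =====
theorem convert_mpg_rating_spec : Claim_equal_convert_mpg_rating := by
  intro l _
  show convert_mpg_rating l = convert_mpg_rating_alt l
  rw [convert_mpg_rating_eq_map, convert_mpg_rating_alt]
  exact List.map_congr_left (fun v _ => pvCell_eq v)
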